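-- pv_equiv track=rewrite | github.com/gqnsptaa/Visual-Analytics-of-Indie-Game-Art-Mapping-Game-Aesthetics-With-AI | src/fetch_igdb_covers.py | collapse_single_letter_runs
-- ===== SOURCE A (Python) =====
-- def collapse_single_letter_runs(tokens: list[str]) -> list[str]:
--     """Join sequences like ['s','t','a','l','k','e','r'] -> ['stalker']."""
--     out: list[str] = []
--     run: list[str] = []
--     for token in tokens:
--         if len(token) == 1 and token.isalpha():
--             run.append(token)
--             continue
--         if run:
--             out.append("".join(run) if len(run) >= 3 else " ".join(run))
--             run = []
--         out.append(token)
--     if run: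
--         out.append("".join(run) if len(run) >= 3 else " ".join(run))
--     return out
-- ===== SOURCE B (Python) =====
-- def collapse_single_letter_runs(tokens: list[str]) -> list[str]:
--     """Join sequences like ['s','t','a','l','k','e','r'] -> ['stalker']."""
--     def is_letter(t: str) -> bool:
--         return len(t) == 1 and t.isalpha()
--
--     out: list[str] = []
--     i, n = 0, len(tokens)
--     while i < n:
--         if is_letter(tokens[i]):
--             j = i
--             while j < n and is_letter(tokens[j]):
--                 j += 1
--             g = tokens[i:j]
--             out.append("".join(g) if j - i >= 3 else " ".join(g))
--             i = j
--         else: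
--             out.append(tokens[i])
--             i += 1
--     return out
-- ===== Notes on version B (the rewrite author's own statement) =====
-- stated objective: alternative
-- what changed: Replaces the run-accumulator loop with its duplicated end-of-loop flush by a span-based scan: each maximal run of single-letter tokens is located with an inner scan and emitted in one place.
import Mathlib
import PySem

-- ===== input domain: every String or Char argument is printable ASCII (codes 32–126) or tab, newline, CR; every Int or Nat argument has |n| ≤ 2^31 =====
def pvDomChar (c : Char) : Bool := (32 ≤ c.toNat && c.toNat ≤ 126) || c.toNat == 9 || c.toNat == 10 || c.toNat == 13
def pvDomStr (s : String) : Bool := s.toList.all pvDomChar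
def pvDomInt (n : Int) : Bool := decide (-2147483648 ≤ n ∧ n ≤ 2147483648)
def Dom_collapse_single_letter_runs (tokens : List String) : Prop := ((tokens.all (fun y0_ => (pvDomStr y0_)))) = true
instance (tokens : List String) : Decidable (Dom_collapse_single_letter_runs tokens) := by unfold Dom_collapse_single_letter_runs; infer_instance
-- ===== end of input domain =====

-- B replaces the run-accumulator loop (with its duplicated end-of-loop flush) by a span-based
-- scan that locates each maximal run of single-letter tokens and emits it in one place.

-- 'len(token) == 1 and token.isalpha()' (shared test, identical in both Pythons)
def pvLetter (t : String) : Bool := (PySem.Str.len t == 1) && PySem.Str.strIsalpha t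

-- '"".join(run) if len(run) >= 3 else " ".join(run)'
def pvJoinRun (run : List String) : String :=
  if run.length ≥ 3 then PySem.Str.join "" run else PySem.Str.join " " run

-- ===== PORT A =====
-- the for-loop over tokens, carrying the state (out, run); then the final flush
def pvGoA (tokens : List String) (out run : List String) : List String :=
  match tokens with
  | [] => if run ≠ [] then out ++ [pvJoinRun run] else out
  | t :: ts =>
    if pvLetter t then pvGoA ts out (run ++ [t])
    else pvGoA ts ((if run ≠ [] then out ++ [pvJoinRun run] else out) ++ [t]) []

def collapse_single_letter_runs (tokens : List String) : List String :=
  pvGoA tokens [] []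

-- ===== PORT B =====
-- span-based scan: inner scan (takeWhile/dropWhile) consumes a maximal letter run at once
def pvGoB (tokens : List String) : List String :=
  match tokens with
  | [] => []
  | t :: ts =>
    if pvLetter t then
      pvJoinRun (t :: ts.takeWhile pvLetter) :: pvGoB (ts.dropWhile pvLetter)
    else
      t :: pvGoB ts
termination_by tokens.length
decreasing_by
  · have := List.length_dropWhile_le pvLetter ts; simp; omega
  · simp

def collapse_single_letter_runs_alt (tokens : List String) : List String :=
  pvGoB tokens

-- ===== PRECONDITION & SPEC =====
def Spec_collapse_single_letter_runs (tokens : List String) (out : List String) : Prop := out = collapse_single_letter_runs_alt tokens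
instance (tokens : List String) (out : List String) : Decidable (Spec_collapse_single_letter_runs tokens out) := by unfold Spec_collapse_single_letter_runs; infer_instance

-- ===== CLAIM (what is proved, stated in full; the proofs are below) =====
def Claim_equal_collapse_single_letter_runs : Prop := ∀ (tokens : List String), Dom_collapse_single_letter_runs tokens → Spec_collapse_single_letter_runs tokens (collapse_single_letter_runs tokens)

-- ===== LEMMAS AND PROOFS =====

lemma takeWhile_all_append {α : Type} (p : α → Bool) (rs ys : List α)
    (h : ∀ x ∈ rs, p x = true) : (rs ++ ys).takeWhile p = rs ++ ys.takeWhile p := by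
  induction rs with
  | nil => simp
  | cons r rs ih =>
    simp only [List.cons_append, List.takeWhile_cons, h r (by simp), if_true]
    rw [ih (fun x hx => h x (by simp [hx]))]

lemma dropWhile_all_append {α : Type} (p : α → Bool) (rs ys : List α)
    (h : ∀ x ∈ rs, p x = true) : (rs ++ ys).dropWhile p = ys.dropWhile p := by
  induction rs with
  | nil => simp
  | cons r rs ih =>
    simp only [List.cons_append, List.dropWhile_cons, h r (by simp)]
    exact ih (fun x hx => h x (by simp [hx]))

-- evaluating B on a nonempty all-letter run followed by the rest of the input
lemma pvGoB_run (run : List String) (hne : run ≠ []) (h : ∀ x ∈ run, pvLetter x = true)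
    (ts : List String) (hts : ts = [] ∨ ∃ t ts', ts = t :: ts' ∧ pvLetter t = false) :
    pvGoB (run ++ ts) = pvJoinRun run :: pvGoB ts := by
  obtain ⟨r, rs, rfl⟩ := List.exists_cons_of_ne_nil hne
  have hr : pvLetter r = true := h r (by simp)
  have hrs : ∀ x ∈ rs, pvLetter x = true := fun x hx => h x (by simp [hx])
  have htake : ts.takeWhile pvLetter = [] := by
    rcases hts with rfl | ⟨t, ts', rfl, ht⟩
    · simp
    · simp [ht]
  have hdrop : ts.dropWhile pvLetter = ts := by
    rcases hts with rfl | ⟨t, ts', rfl, ht⟩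
    · simp
    · simp [ht]
  rw [List.cons_append, pvGoB, if_pos hr,
    takeWhile_all_append pvLetter rs ts hrs, htake,
    dropWhile_all_append pvLetter rs ts hrs, hdrop]
  simp

lemma pvGoA_eq (ts : List String) : ∀ out run, (∀ x ∈ run, pvLetter x = true) →
    pvGoA ts out run = out ++ pvGoB (run ++ ts) := by
  induction ts with
  | nil =>
    intro out run h
    by_cases hne : run = []
    · subst hne; simp [pvGoA, pvGoB]
    · have h2 := pvGoB_run run hne h [] (Or.inl rfl)
      rw [List.append_nil] at h2
      rw [pvGoA, if_pos hne, List.append_nil, h2]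
      simp [pvGoB]
  | cons t ts ih =>
    intro out run h
    by_cases hl : pvLetter t = true
    · rw [pvGoA, if_pos hl, ih out (run ++ [t])
        (by intro x hx; rcases List.mem_append.1 hx with hx | hx
            · exact h x hx
            · simp at hx; subst hx; exact hl)]
      simp
    · have hlf : pvLetter t = false := by simpa using hl
      rw [pvGoA, if_neg hl]
      by_cases hne : run = []
      · subst hne
        rw [ih _ [] (by simp)]
        simp [pvGoB, hlf]
      · rw [if_pos hne, ih _ [] (by simp),
          pvGoB_run run hne h (t :: ts) (Or.inr ⟨t, ts, rfl, hlf⟩)]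
        simp [pvGoB, hlf]

-- ===== VERDICT (by name: the statement is the Claim_ definition above) =====
theorem collapse_single_letter_runs_spec : Claim_equal_collapse_single_letter_runs := by
  intro tokens _
  show collapse_single_letter_runs tokens = collapse_single_letter_runs_alt tokens
  unfold collapse_single_letter_runs collapse_single_letter_runs_alt
  simpa using pvGoA_eq tokens [] [] (by simp)
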